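-- pv_equiv track=rewrite | github.com/zr123/AdventOfCode2021 | AoC2021/day17.py | calc_valid_x_velocities
-- ===== SOURCE A (Python) =====
-- def calc_valid_x_velocities(min_x, max_x):
--     valid_x_velocities = set()
--     for starting_x_velocity in range(500):
--         x_speed = starting_x_velocity
--         x_position = 0
--         # simulate
--         while True:
--             x_position += x_speed
--             if x_speed > 0:
--                 x_speed -= 1
--             if min_x <= x_position <= max_x:
--                 valid_x_velocities.add(starting_x_velocity)
--             if x_position > max_x or x_speed == 0:
--                 break
--     return valid_x_velocities
-- ===== SOURCE B (Python) =====
-- def calc_valid_x_velocities(min_x, max_x):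
--     # Positions reached with start velocity v are p(n) = n*v - n*(n-1)//2 for n = 1..v
--     # (v = 0 only ever sits at 0); they are non-decreasing in n, so v hits the target
--     # iff the first position >= min_x is also <= max_x (found by binary search).
--     valid = set()
--     for v in range(500):
--         if v == 0:
--             if min_x <= 0 <= max_x:
--                 valid.add(0)
--             continue
--         p = lambda n: n * v - n * (n - 1) // 2
--         if p(v) < min_x:
--             continue
--         lo, hi = 1, v
--         while lo < hi:
--             mid = (lo + hi) // 2
--             if p(mid) >= min_x:
--                 hi = mid
--             else:
--                 lo = mid + 1
--         if p(lo) <= max_x: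
--             valid.add(v)
--     return valid
-- ===== Notes on version B (the rewrite author's own statement) =====
-- stated objective: faster
-- what changed: Replaces the per-velocity step-by-step flight simulation with the closed-form position p(n)=n*v-n*(n-1)//2 and a binary search for the first position >= min_x, using monotonicity of the positions.
import Mathlib
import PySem

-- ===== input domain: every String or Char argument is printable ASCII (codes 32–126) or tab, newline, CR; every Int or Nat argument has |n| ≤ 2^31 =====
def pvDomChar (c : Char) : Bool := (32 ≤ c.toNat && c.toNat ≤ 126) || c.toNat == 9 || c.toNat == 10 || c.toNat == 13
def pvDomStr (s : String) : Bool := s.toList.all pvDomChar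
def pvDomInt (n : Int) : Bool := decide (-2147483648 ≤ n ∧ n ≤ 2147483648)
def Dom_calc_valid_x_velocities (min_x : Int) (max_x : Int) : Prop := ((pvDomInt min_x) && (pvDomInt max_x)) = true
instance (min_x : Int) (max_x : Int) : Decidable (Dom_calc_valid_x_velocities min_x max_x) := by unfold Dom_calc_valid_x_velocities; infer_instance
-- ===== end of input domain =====

-- B replaces A's step-by-step flight simulation by the closed-form position
-- p(n) = n*v - n*(n-1)//2 and a binary search for the first position ≥ min_x (faster).


-- ===== PORT A =====
-- A's 'while True' body, step for step; x_speed is kept as a Nat (it starts at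
-- starting_x_velocity ∈ range(500) and is never decremented below 0 by A's code),
-- which is the termination measure of the loop
def simA (min_x max_x sv : Int) (speed : Nat) (pos : Int) (acc : PySem.Set Int) : PySem.Set Int :=
  let pos' := pos + (speed : Int)                                     -- x_position += x_speed
  let speed' := if speed > 0 then speed - 1 else speed                -- if x_speed > 0: x_speed -= 1
  let acc' := if min_x ≤ pos' ∧ pos' ≤ max_x then PySem.Set.add acc sv else acc
  if pos' > max_x ∨ speed' = 0 then acc'                              -- break
  else simA min_x max_x sv speed' pos' acc'
termination_by speed
decreasing_by by_cases hs : speed > 0 <;> simp_all [speed']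

def calc_valid_x_velocities (min_x : Int) (max_x : Int) : List Int :=
  (PySem.List.pyRange 0 500 1).foldl
    (fun acc sv => simA min_x max_x sv sv.toNat 0 acc) PySem.Set.empty

-- ===== PORT B =====
-- p = lambda n: n * v - n * (n - 1) // 2
def pB (v n : Int) : Int := n * v - PySem.Int.floordiv (n * (n - 1)) 2

-- B's 'while lo < hi' binary search; terminates because hi - lo shrinks
def bsB (min_x v lo hi : Int) : Int :=
  if lo < hi then
    let mid := PySem.Int.floordiv (lo + hi) 2
    if pB v mid ≥ min_x then bsB min_x v lo mid else bsB min_x v (mid + 1) hi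
  else lo
termination_by (hi - lo).toNat
decreasing_by
  · have h2 := (PySem.Int.floordiv_lt_iff_lt_mul (a := lo + hi) (b := 2) (q := hi) (by omega)).2 (by omega)
    simp only [mid] at *; omega
  · have h1 := (PySem.Int.le_floordiv_iff_mul_le (a := lo + hi) (b := 2) (q := lo) (by omega)).2 (by omega)
    simp only [mid] at *; omega

def calc_valid_x_velocities_alt (min_x : Int) (max_x : Int) : List Int :=
  (PySem.List.pyRange 0 500 1).foldl
    (fun acc v =>
      if v = 0 then
        if min_x ≤ 0 ∧ (0 : Int) ≤ max_x then PySem.Set.add acc 0 else acc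
      else if pB v v < min_x then acc
      else if pB v (bsB min_x v 1 v) ≤ max_x then PySem.Set.add acc v else acc)
    PySem.Set.empty

-- ===== PRECONDITION & SPEC =====
def Spec_calc_valid_x_velocities (min_x : Int) (max_x : Int) (out : List Int) : Prop := out = calc_valid_x_velocities_alt min_x max_x
instance (min_x : Int) (max_x : Int) (out : List Int) : Decidable (Spec_calc_valid_x_velocities min_x max_x out) := by unfold Spec_calc_valid_x_velocities; infer_instance

-- ===== CLAIM (what is proved, stated in full; the proofs are below) =====
def Claim_equal_calc_valid_x_velocities : Prop := ∀ (min_x : Int) (max_x : Int), Dom_calc_valid_x_velocities min_x max_x → Spec_calc_valid_x_velocities min_x max_x (calc_valid_x_velocities min_x max_x)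

-- ===== LEMMAS AND PROOFS =====

-- sum of the first n simulated increments from speed sp: S sp n = sp + (sp-1) + … + (sp-n+1)
def S : Nat → Nat → Int
  | _, 0 => 0
  | sp, n + 1 => (sp : Int) + S (sp - 1) n

-- the simulation started in state (speed, pos) visits a position inside [min_x, max_x]
def Hit (min_x max_x : Int) (speed : Nat) (pos : Int) : Prop :=
  ∃ n : Nat, 1 ≤ n ∧ n ≤ max speed 1 ∧ min_x ≤ pos + S speed n ∧ pos + S speed n ≤ max_x

theorem set_add_idem {s : PySem.Set Int} {x : Int} :
    PySem.Set.add (PySem.Set.add s x) x = PySem.Set.add s x := by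
  by_cases h : x ∈ s <;> simp [PySem.Set.add, PySem.Set.contains, h]

theorem S_nonneg : ∀ (n sp : Nat), n ≤ sp → 0 ≤ S sp n
  | 0, _, _ => by simp [S]
  | n + 1, 0, h => by omega
  | n + 1, sp + 1, h => by
      have := S_nonneg n sp (by omega)
      simp only [S, Nat.add_sub_cancel]
      omega

theorem S_ge_self (sp n : Nat) (h1 : 1 ≤ n) (h2 : n ≤ sp) : (sp : Int) ≤ S sp n := by
  obtain ⟨m, rfl⟩ : ∃ m, n = m + 1 := ⟨n - 1, by omega⟩
  obtain ⟨s, rfl⟩ : ∃ s, sp = s + 1 := ⟨sp - 1, by omega⟩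
  have := S_nonneg m s (by omega)
  simp only [S, Nat.add_sub_cancel]
  omega

theorem S_succ_right : ∀ (n sp : Nat), n < sp → S sp (n + 1) = S sp n + ((sp : Int) - (n : Int))
  | 0, sp, _ => by simp [S]
  | n + 1, sp, h => by
      obtain ⟨m, rfl⟩ : ∃ m, sp = m + 1 := ⟨sp - 1, by omega⟩
      have := S_succ_right n m (by omega)
      simp only [S, Nat.add_sub_cancel] at *
      push_cast
      omega

theorem pB_succ (v n : Int) : pB v (n + 1) = pB v n + (v - n) := by
  unfold pB
  rw [PySem.Int.floordiv_eq_ediv_of_pos (by norm_num), PySem.Int.floordiv_eq_ediv_of_pos (by norm_num)]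
  have h : (n + 1) * ((n + 1) - 1) = n * (n - 1) + n * 2 := by ring
  rw [h, Int.add_mul_ediv_right _ _ (by norm_num)]
  ring

theorem S_eq_pB : ∀ (n v : Nat), n ≤ v → S v n = pB (v : Int) (n : Int)
  | 0, v, _ => by norm_num [S, pB, PySem.Int.floordiv_eq_ediv_of_pos]
  | n + 1, v, h => by
      have h1 := S_succ_right n v (by omega)
      have h2 := S_eq_pB n v (by omega)
      have h3 := pB_succ (v : Int) (n : Int)
      push_cast
      push_cast at h1
      omega

theorem pB_mono : ∀ (k : Nat) (v a b : Int), (b - a).toNat = k → a ≤ b → b ≤ v → pB v a ≤ pB v b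
  | 0, v, a, b, hk, hab, _ => by
      have : a = b := by omega
      subst this; exact le_refl _
  | k + 1, v, a, b, hk, hab, hbv => by
      have hb : b - 1 + 1 = b := by ring
      have h1 := pB_succ v (b - 1)
      rw [hb] at h1
      have h2 := pB_mono k v a (b - 1) (by omega) (by omega) (by omega)
      omega

theorem hit_zero (m M pos : Int) : Hit m M 0 pos ↔ m ≤ pos ∧ pos ≤ M := by
  constructor
  · rintro ⟨n, h1, h2, h3, h4⟩
    have : n = 1 := by omega
    subst this
    simp only [S] at h3 h4
    constructor <;> omega
  · rintro ⟨h1, h2⟩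
    exact ⟨1, le_refl _, by omega, by simp [S]; omega, by simp [S]; omega⟩

theorem hit_one (m M pos : Int) : Hit m M 1 pos ↔ m ≤ pos + 1 ∧ pos + 1 ≤ M := by
  constructor
  · rintro ⟨n, h1, h2, h3, h4⟩
    have : n = 1 := by omega
    subst this
    simp only [S, Nat.cast_one] at h3 h4
    constructor <;> omega
  · rintro ⟨h1, h2⟩
    refine ⟨1, le_refl _, by omega, ?_, ?_⟩ <;> simp [S] <;> omega

theorem hit_succ (m M : Int) (s : Nat) (hs : 1 ≤ s) (pos : Int) :
    Hit m M (s + 1) pos ↔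
      ((m ≤ pos + ((s : Int) + 1) ∧ pos + ((s : Int) + 1) ≤ M) ∨ Hit m M s (pos + ((s : Int) + 1))) := by
  constructor
  · rintro ⟨n, h1, h2, h3, h4⟩
    match n, h1 with
    | 1, _ =>
      left
      simp only [S] at h3 h4
      push_cast at h3 h4
      constructor <;> omega
    | (k + 2), _ =>
      right
      refine ⟨k + 1, by omega, by omega, ?_, ?_⟩ <;>
      · simp only [S, Nat.add_sub_cancel] at h3 h4 ⊢
        push_cast at h3 h4 ⊢
        omega
  · rintro (⟨h1, h2⟩ | ⟨k, h1, h2, h3, h4⟩)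
    · refine ⟨1, le_refl _, by omega, ?_, ?_⟩ <;>
      · simp only [S]
        push_cast
        omega
    · refine ⟨k + 1, by omega, by omega, ?_, ?_⟩ <;>
      · simp only [S, Nat.add_sub_cancel] at h3 h4 ⊢
        push_cast at h3 h4 ⊢
        omega

theorem simA_char (min_x max_x sv : Int) : ∀ (speed : Nat) (pos : Int) (acc : PySem.Set Int),
    (Hit min_x max_x speed pos → simA min_x max_x sv speed pos acc = PySem.Set.add acc sv) ∧
    (¬ Hit min_x max_x speed pos → simA min_x max_x sv speed pos acc = acc) := by
  intro speed
  induction speed with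
  | zero =>
    intro pos acc
    rw [simA]
    simp only [Nat.cast_zero, add_zero, gt_iff_lt, lt_irrefl, if_false, or_true, if_true,
      hit_zero]
    constructor
    · intro h; rw [if_pos h]
    · intro h; rw [if_neg h]
  | succ s ih =>
    intro pos acc
    rw [simA]
    simp only [Nat.cast_add, Nat.cast_one, gt_iff_lt, Nat.succ_sub_one, if_pos (Nat.succ_pos s)]
    by_cases hs : s = 0
    · subst hs
      simp only [Nat.cast_zero, zero_add, or_true, if_true, hit_one]
      constructor
      · intro h; rw [if_pos h]
      · intro h; rw [if_neg h]
    · have hs1 : 1 ≤ s := by omega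
      rw [hit_succ min_x max_x s hs1 pos]
      by_cases hM : max_x < pos + ((s : Int) + 1)
      · rw [if_pos (Or.inl hM)]
        constructor
        · rintro (⟨_, h2⟩ | hHit)
          · omega
          · exact absurd hHit (by
              rintro ⟨n, h1, h2, h3, h4⟩
              have hge := S_ge_self s n h1 (by omega)
              omega)
        · intro _
          rw [if_neg (by omega)]
      · rw [if_neg (by simp [hs, hM])]
        have ih1 := ih (pos + ((s : Int) + 1))
        by_cases h1 : min_x ≤ pos + ((s : Int) + 1) ∧ pos + ((s : Int) + 1) ≤ max_x
        · rw [if_pos h1]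
          by_cases h2 : Hit min_x max_x s (pos + ((s : Int) + 1))
          · constructor
            · intro _
              rw [(ih1 (PySem.Set.add acc sv)).1 h2, set_add_idem]
            · intro h; exact absurd (Or.inl h1) h
          · constructor
            · intro _
              rw [(ih1 (PySem.Set.add acc sv)).2 h2]
            · intro h; exact absurd (Or.inl h1) h
        · rw [if_neg h1]
          constructor
          · rintro (h | h2)
            · exact absurd h h1
            · exact (ih1 acc).1 h2
          · intro h
            exact (ih1 acc).2 (fun h2 => h (Or.inr h2))

theorem bsB_spec (m v : Int) : ∀ (fuel : Nat) (lo hi : Int), (hi - lo).toNat ≤ fuel →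
    1 ≤ lo → lo ≤ hi → hi ≤ v → m ≤ pB v hi → (∀ k, 1 ≤ k → k < lo → pB v k < m) →
    lo ≤ bsB m v lo hi ∧ bsB m v lo hi ≤ hi ∧ m ≤ pB v (bsB m v lo hi) ∧
      (∀ k, 1 ≤ k → k < bsB m v lo hi → pB v k < m) := by
  intro fuel
  induction fuel with
  | zero =>
    intro lo hi hf h1 h2 h3 h4 h5
    have : lo = hi := by omega
    subst this
    rw [bsB, if_neg (by omega)]
    exact ⟨le_refl _, le_refl _, h4, h5⟩
  | succ f ih =>
    intro lo hi hf h1 h2 h3 h4 h5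
    by_cases hlt : lo < hi
    · rw [bsB, if_pos hlt]
      have hmid1 := (PySem.Int.le_floordiv_iff_mul_le (a := lo + hi) (b := 2) (q := lo) (by omega)).2 (by omega)
      have hmid2 := (PySem.Int.floordiv_lt_iff_lt_mul (a := lo + hi) (b := 2) (q := hi) (by omega)).2 (by omega)
      set mid := PySem.Int.floordiv (lo + hi) 2 with hmid
      by_cases hge : pB v mid ≥ m
      · rw [if_pos hge]
        have := ih lo mid (by omega) h1 (by omega) (by omega) hge h5
        exact ⟨this.1, by omega, this.2.2.1, this.2.2.2⟩
      · rw [if_neg hge]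
        have hinv : ∀ k, 1 ≤ k → k < mid + 1 → pB v k < m := by
          intro k hk1 hk2
          by_cases hklo : k < lo
          · exact h5 k hk1 hklo
          · have := pB_mono (mid - k).toNat v k mid rfl (by omega) (by omega)
            omega
        have := ih (mid + 1) hi (by omega) (by omega) (by omega) h3 h4 hinv
        exact ⟨by omega, this.2.1, this.2.2.1, this.2.2.2⟩
    · have : lo = hi := by omega
      subst this
      rw [bsB, if_neg (by omega)]
      exact ⟨le_refl _, le_refl _, h4, h5⟩

theorem hit_iff_B (m M v : Int) (hv : 1 ≤ v) :
    Hit m M v.toNat 0 ↔ (¬ pB v v < m ∧ pB v (bsB m v 1 v) ≤ M) := by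
  have hvt : (v.toNat : Int) = v := Int.toNat_of_nonneg (by omega)
  have hmax : max v.toNat 1 = v.toNat := by omega
  constructor
  · rintro ⟨n, h1, h2, h3, h4⟩
    rw [hmax] at h2
    have hS : S v.toNat n = pB v (n : Int) := by
      have := S_eq_pB n v.toNat h2
      rwa [hvt] at this
    rw [zero_add, hS] at h3 h4
    have hnv : (n : Int) ≤ v := by omega
    have hmv : m ≤ pB v v := le_trans h3 (pB_mono (v - (n : Int)).toNat v n v rfl hnv le_rfl)
    obtain ⟨hr1, hr2, hr3, hr4⟩ := bsB_spec m v (v - 1).toNat 1 v (by omega) le_rfl hv le_rfl hmv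
      (by intro k hk1 hk2; omega)
    refine ⟨by omega, ?_⟩
    rcases le_or_gt (bsB m v 1 v) (n : Int) with hle | hgt
    · exact le_trans (pB_mono ((n : Int) - bsB m v 1 v).toNat v _ _ rfl hle hnv) h4
    · exact absurd h3 (by have := hr4 (n : Int) (by omega) hgt; omega)
  · rintro ⟨hA, hB⟩
    have hmv : m ≤ pB v v := by omega
    obtain ⟨hr1, hr2, hr3, hr4⟩ := bsB_spec m v (v - 1).toNat 1 v (by omega) le_rfl hv le_rfl hmv
      (by intro k hk1 hk2; omega)
    set r := bsB m v 1 v with hr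
    have hrt : ((r.toNat : Int)) = r := Int.toNat_of_nonneg (by omega)
    refine ⟨r.toNat, by omega, by omega, ?_, ?_⟩ <;>
    · rw [zero_add]
      have hS : S v.toNat r.toNat = pB v r := by
        have := S_eq_pB r.toNat v.toNat (by omega)
        rwa [hvt, hrt] at this
      rw [hS]
      omega

-- ===== VERDICT (by name: the statement is the Claim_ definition above) =====
theorem calc_valid_x_velocities_spec : Claim_equal_calc_valid_x_velocities := by
  intro m M _
  unfold Spec_calc_valid_x_velocities calc_valid_x_velocities calc_valid_x_velocities_alt
  apply PySem.List.foldl_congr_mem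
  intro acc v hv
  rw [PySem.List.mem_pyRange_one] at hv
  by_cases hv0 : v = 0
  · subst hv0
    rw [if_pos rfl]
    simp only [Int.toNat_zero]
    rw [simA]
    simp only [Nat.cast_zero, add_zero, gt_iff_lt, lt_irrefl, if_false, or_true, if_true]
  · have hv1 : 1 ≤ v := by omega
    have hchar := simA_char m M v v.toNat 0 acc
    rw [if_neg hv0]
    by_cases hHit : Hit m M v.toNat 0
    · rw [hchar.1 hHit]
      obtain ⟨hA, hB⟩ := (hit_iff_B m M v hv1).1 hHit
      rw [if_neg hA, if_pos hB]
    · rw [hchar.2 hHit]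
      rw [hit_iff_B m M v hv1] at hHit
      by_cases ha : pB v v < m
      · rw [if_pos ha]
      · rw [if_neg ha, if_neg (fun hb => hHit ⟨ha, hb⟩)]
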